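-- pv_equiv track=rewrite | github.com/Xinglab/isoCirc | isoCirc_pipeline/isocirc/parse_bam.py | get_I_from_cigar
-- ===== SOURCE A (Python) =====
-- import copy
--
-- BAM_CMATCH = 0  # M
--
-- BAM_CINS = 1  # I
--
-- BAM_CEQUAL = 7  # =
--
-- BAM_CDIFF = 8  # X
--
-- def is_cigar_M(c):
--     if c == BAM_CMATCH or c == BAM_CEQUAL or c == BAM_CDIFF:
--         return True
--     else:
--         return False
--
-- def get_I_from_cigar(cigartuples=[], start=0, end=0):  # Aligned bases
--     tuples = copy.copy(cigartuples)
--     start_remain_len = start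
--     end_remain_len = end - start
--     ins, mi = 0, 0
--
--     # print start_remain_len, end_remain_len
--     while start_remain_len > 0:
--         if is_cigar_M(tuples[mi][0]) or tuples[mi][0] == BAM_CINS:
--             if tuples[mi][1] > start_remain_len:
--                 tuples[mi] = (BAM_CMATCH, tuples[mi][1] - start_remain_len)
--                 break
--             else:
--                 start_remain_len -= tuples[mi][1]
--
--         mi += 1
--     # print tuples
--     while end_remain_len > 0:
--         # print end_remain_len
--         if is_cigar_M(tuples[mi][0]):
--             if tuples[mi][1] > end_remain_len:
--                 break
--             else:
--                 end_remain_len -= tuples[mi][1]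
--         elif tuples[mi][0] == BAM_CINS:
--             if tuples[mi][1] > end_remain_len:
--                 ins += end_remain_len
--                 break
--             else:
--                 end_remain_len -= tuples[mi][1]
--                 ins += tuples[mi][1]
--         mi += 1
--     # print ret_cigar
--     return ins
-- ===== SOURCE B (Python) =====
-- def get_I_from_cigar(cigartuples=[], start=0, end=0):  # Aligned bases
--     # Count inserted bases inside a window of the aligned (M/I) coordinate:
--     # skip the first `start` aligned bases (when positive), then count the
--     # insertions among the following `end - start`, clamping an insertion
--     # that runs past the window.  Scans until the window end is covered, so
--     # the index access fails if the cigar is shorter than the window.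
--     lo = max(start, 0)
--     hi = lo + (end - start)
--     ins = 0
--     pos = 0
--     i = 0
--     while pos < hi:
--         op, length = cigartuples[i]
--         if op == 1:  # I
--             if pos >= lo:
--                 ins += min(length, hi - pos)
--             pos += length
--         elif op == 0 or op == 7 or op == 8:  # M, =, X
--             pos += length
--         i += 1
--     return ins
-- ===== Notes on version B (the rewrite author's own statement) =====
-- stated objective: simpler
-- what changed: One forward pass with an absolute position counter over the aligned (M/I) coordinate, counting each insertion whose insertion point lies in the window (clamped at the window end), instead of A's two sequential index-driven consume loops over a mutated copy of the list; B's index access still raises IndexError when the cigar is shorter than the window. Pre_ excludes cigar overruns (both raise IndexError there) and, when the window is nonempty and an insertion op is present, negative M/I operation lengths, which lie outside a cigar's natural domain.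
-- outside the precondition, e.g. on get_I_from_cigar([(0, 2), (0, -5), (1, 1), (0, 9)], 1, 3): A returns 1, B returns 0
import Mathlib
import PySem

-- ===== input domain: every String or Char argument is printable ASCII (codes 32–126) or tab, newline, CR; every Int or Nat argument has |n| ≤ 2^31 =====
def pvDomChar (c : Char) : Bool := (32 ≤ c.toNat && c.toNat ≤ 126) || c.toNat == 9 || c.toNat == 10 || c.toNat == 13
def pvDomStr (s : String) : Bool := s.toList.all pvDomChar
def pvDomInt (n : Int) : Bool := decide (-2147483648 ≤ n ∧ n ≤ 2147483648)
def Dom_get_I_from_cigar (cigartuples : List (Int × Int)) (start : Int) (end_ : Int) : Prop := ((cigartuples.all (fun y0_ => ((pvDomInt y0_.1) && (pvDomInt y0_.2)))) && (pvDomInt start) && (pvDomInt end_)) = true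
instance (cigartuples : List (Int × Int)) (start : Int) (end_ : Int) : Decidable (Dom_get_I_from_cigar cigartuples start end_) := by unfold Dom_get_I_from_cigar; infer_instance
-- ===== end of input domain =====

-- B counts insertions in one forward pass with an absolute position counter over the aligned
-- coordinate instead of A's two sequential consume loops over a mutated copy of the list
-- (same IndexError on a cigar shorter than the window, from B's own index access); objective: simpler.


-- ===== PORT A =====
def is_cigar_M (c : Int) : Bool :=
  if c == 0 || c == 7 || c == 8 then true else false

-- first while loop of A: consume `start` M/I bases; Python walks an index mi forward over its
-- copy of the list and only ever reads/writes position mi onward, so the port recurses on the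
-- suffix, returning the suffix from mi (with the straddling op relabelled to MATCH, as A does).
-- `[] with rem > 0` is Python's IndexError (excluded by Pre_); the port returns [] there.
def pvLoop1 (tuples : List (Int × Int)) (rem : Int) : List (Int × Int) :=
  if rem > 0 then
    match tuples with
    | [] => []
    | (c, l) :: rest =>
      if is_cigar_M c || c == 1 then
        if l > rem then (0, l - rem) :: rest
        else pvLoop1 rest (rem - l)
      else pvLoop1 rest rem
  else tuples

-- second while loop of A, same suffix recursion; `[] with rem > 0` is Python's IndexError.
def pvLoop2 (tuples : List (Int × Int)) (rem : Int) (ins : Int) : Int :=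
  if rem > 0 then
    match tuples with
    | [] => ins
    | (c, l) :: rest =>
      if is_cigar_M c then
        if l > rem then ins
        else pvLoop2 rest (rem - l) ins
      else if c == 1 then
        if l > rem then ins + rem
        else pvLoop2 rest (rem - l) (ins + l)
      else pvLoop2 rest rem ins
  else ins

def get_I_from_cigar (cigartuples : List (Int × Int)) (start : Int) (end_ : Int) : Int :=
  pvLoop2 (pvLoop1 cigartuples start) (end_ - start) 0

-- ===== PORT B =====
-- Source B's while loop: pos is the cumulative M/I length already walked; the loop stops when pos
-- has covered the window end hi.  `[] with pos < hi` is Python's IndexError from cigartuples[i]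
-- (excluded by Pre_); the port returns ins there.
def pvBGo (start end_ : Int) : List (Int × Int) → Int → Int → Int
  | [], _, ins => ins
  | (op, l) :: rest, pos, ins =>
    if end_ ≤ pos then ins
    else if op == 1 then
      pvBGo start end_ rest (pos + l) (if start ≤ pos then ins + min l (end_ - pos) else ins)
    else if op == 0 || op == 7 || op == 8 then
      pvBGo start end_ rest (pos + l) ins
    else pvBGo start end_ rest pos ins

def get_I_from_cigar_alt (cigartuples : List (Int × Int)) (start : Int) (end_ : Int) : Int :=
  pvBGo (max start 0) (max start 0 + (end_ - start)) cigartuples 0 0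

-- ===== PRECONDITION & SPEC =====
-- total M/I length A must be able to consume (start then end-start, minus the final clamp)
def pvT (start end_ : Int) : Int :=
  if start > 0 then max start end_ else max 0 (end_ - start)

def pvStopLen (ys : List (Int × Int)) : Int :=
  match ys with
  | [] => 0
  | (c, l) :: _ => if c = 0 ∨ c = 1 ∨ c = 7 ∨ c = 8 then max 0 l else 0

def pvMISum (xs : List (Int × Int)) : Int :=
  xs.foldl (fun a p => if p.1 = 0 ∨ p.1 = 1 ∨ p.1 = 7 ∨ p.1 = 8 then a + p.2 else a) 0

-- Pre_ excludes (a) cigar overruns, where A's tuples[mi] access raises IndexError (no cut j at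
-- which the consumed M/I prefix plus the clamped op covers the total target), and (b) when the
-- window is nonempty and an insertion op is present, negative M/I operation lengths — outside a
-- cigar's natural domain (cigar operation lengths are nonnegative).
def Pre_get_I_from_cigar (cigartuples : List (Int × Int)) (start : Int) (end_ : Int) : Prop :=
  ((∀ p ∈ cigartuples, (p.1 = 0 ∨ p.1 = 1 ∨ p.1 = 7 ∨ p.1 = 8) → 0 ≤ p.2) ∨
    (∀ p ∈ cigartuples, p.1 ≠ 1) ∨ end_ ≤ start) ∧
  ∃ j ∈ List.range (cigartuples.length + 1),
    pvT start end_ ≤ pvMISum (cigartuples.take j) + pvStopLen (cigartuples.drop j)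

instance (cigartuples : List (Int × Int)) (start : Int) (end_ : Int) : Decidable (Pre_get_I_from_cigar cigartuples start end_) := by unfold Pre_get_I_from_cigar; infer_instance

def pvWitness_get_I_from_cigar : (List (Int × Int)) × Int × Int := ([(0, 2), (1, 1), (0, 4)], 0, 5)

def Spec_get_I_from_cigar (cigartuples : List (Int × Int)) (start : Int) (end_ : Int) (out : Int) : Prop := out = get_I_from_cigar_alt cigartuples start end_
instance (cigartuples : List (Int × Int)) (start : Int) (end_ : Int) (out : Int) : Decidable (Spec_get_I_from_cigar cigartuples start end_ out) := by unfold Spec_get_I_from_cigar; infer_instance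

-- ===== CLAIM (what is proved, stated in full; the proofs are below) =====
def Claim_equal_get_I_from_cigar : Prop := ∀ (cigartuples : List (Int × Int)) (start : Int) (end_ : Int), Dom_get_I_from_cigar cigartuples start end_ → Pre_get_I_from_cigar cigartuples start end_ → Spec_get_I_from_cigar cigartuples start end_ (get_I_from_cigar cigartuples start end_)

-- ===== LEMMAS AND PROOFS =====

theorem pvLoop2_nonpos (xs : List (Int × Int)) (r ins : Int) (h : ¬ r > 0) :
    pvLoop2 xs r ins = ins := by
  cases xs <;> rw [pvLoop2] <;> simp [h]

theorem pvLoop1_nonpos (xs : List (Int × Int)) (r : Int) (h : ¬ r > 0) : pvLoop1 xs r = xs := by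
  cases xs <;> rw [pvLoop1] <;> simp [h]

-- once pos has reached end_, B's loop breaks and returns ins unchanged
theorem pvBGo_stop (start end_ : Int) (ys : List (Int × Int)) (pos ins : Int)
    (h : end_ ≤ pos) : pvBGo start end_ ys pos ins = ins := by
  cases ys with
  | nil => rfl
  | cons p rest => obtain ⟨c, l⟩ := p; rw [pvBGo]; simp [h]

-- an empty window [start, end_) with end_ ≤ start collects nothing
theorem pvBGo_empty (start end_ : Int) (ys : List (Int × Int)) (hse : end_ ≤ start) :
    ∀ pos ins : Int, pvBGo start end_ ys pos ins = ins := by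
  induction ys with
  | nil => intro pos ins; rfl
  | cons p rest ih =>
    intro pos ins
    obtain ⟨c, l⟩ := p
    rw [pvBGo]
    by_cases hp : end_ ≤ pos
    · simp [hp]
    · have hst : ¬ start ≤ pos := by omega
      simp only [if_neg hp, if_neg hst]
      split_ifs <;> exact ih _ _

-- phase 2: once the window is open (start ≤ pos = end_ - rem), B tracks A's second loop
theorem pvB_loop2 (start end_ : Int) (ys : List (Int × Int))
    (hl : ∀ p ∈ ys, (p.1 = 0 ∨ p.1 = 1 ∨ p.1 = 7 ∨ p.1 = 8) → 0 ≤ p.2) :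
    ∀ rem ins : Int, 0 < rem → start ≤ end_ - rem →
      pvBGo start end_ ys (end_ - rem) ins = pvLoop2 ys rem ins := by
  induction ys with
  | nil =>
    intro rem ins hrem _
    rw [pvLoop2]
    simp [hrem, pvBGo]
  | cons p rest ih =>
    intro rem ins hrem hst
    obtain ⟨c, l⟩ := p
    have hlr : ∀ q ∈ rest, (q.1 = 0 ∨ q.1 = 1 ∨ q.1 = 7 ∨ q.1 = 8) → 0 ≤ q.2 :=
      fun q hq => hl q (List.mem_cons_of_mem _ hq)
    have hnp : ¬ end_ ≤ end_ - rem := by omega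
    rw [pvBGo, pvLoop2]
    simp only [if_pos hrem, if_neg hnp]
    by_cases hc1 : c = 1
    · have hl0 : 0 ≤ l := hl (c, l) (List.mem_cons_self) (by omega)
      subst hc1
      have hM : is_cigar_M 1 = false := rfl
      simp only [hM, Bool.false_eq_true, if_false, if_pos (by omega : start ≤ end_ - rem)]
      norm_num
      by_cases hgt : l > rem
      · rw [if_pos hgt, min_eq_right (by omega : rem ≤ l),
          pvBGo_stop _ _ _ _ _ (by omega)]
      · rw [if_neg hgt, min_eq_left (by omega : l ≤ rem)]
        by_cases hz : 0 < rem - l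
        · have := ih hlr (rem - l) (ins + l) hz (by omega)
          rw [show end_ - (rem - l) = end_ - rem + l by ring] at this
          rw [this]
        · rw [pvBGo_stop _ _ _ _ _ (by omega), pvLoop2_nonpos _ _ _ hz]
    · by_cases hmi : c = 0 ∨ c = 7 ∨ c = 8
      · have hl0 : 0 ≤ l := hl (c, l) (List.mem_cons_self) (by tauto)
        have hM : is_cigar_M c = true := by
          rcases hmi with h' | h' | h' <;> simp [is_cigar_M, h']
        have hb : (c == 0 || c == 7 || c == 8) = true := by
          rcases hmi with h' | h' | h' <;> simp [h']
        have hc1' : (c == 1) = false := by simp [hc1]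
        simp only [hM, if_true, hc1', Bool.false_eq_true, if_false, hb]
        by_cases hgt : l > rem
        · rw [if_pos hgt, pvBGo_stop _ _ _ _ _ (by omega)]
        · rw [if_neg hgt]
          by_cases hz : 0 < rem - l
          · have := ih hlr (rem - l) ins hz (by omega)
            rw [show end_ - (rem - l) = end_ - rem + l by ring] at this
            rw [this]
          · rw [pvBGo_stop _ _ _ _ _ (by omega), pvLoop2_nonpos _ _ _ hz]
      · have hM : is_cigar_M c = false := by
          simp only [not_or] at hmi
          simp [is_cigar_M, hmi.1, hmi.2.1, hmi.2.2]
        have hb : (c == 0 || c == 7 || c == 8) = false := by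
          simp only [not_or] at hmi
          simp [hmi.1, hmi.2.1, hmi.2.2]
        have hc1' : (c == 1) = false := by simp [hc1]
        simp only [hM, hc1', hb, Bool.false_eq_true, if_false]
        exact ih hlr rem ins hrem hst

-- phase 1: while start is not yet consumed (pos = start - rem < start), B tracks A's first loop
theorem pvB_loop1 (start end_ : Int) (xs : List (Int × Int))
    (hl : ∀ p ∈ xs, (p.1 = 0 ∨ p.1 = 1 ∨ p.1 = 7 ∨ p.1 = 8) → 0 ≤ p.2) :
    ∀ rem ins : Int, 0 < rem →
      pvBGo start end_ xs (start - rem) ins = pvLoop2 (pvLoop1 xs rem) (end_ - start) ins := by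
  induction xs with
  | nil =>
    intro rem ins hrem
    rw [pvLoop1]
    simp only [if_pos hrem]
    rw [pvLoop2]
    simp [pvBGo]
  | cons p rest ih =>
    intro rem ins hrem
    obtain ⟨c, l⟩ := p
    have hlr : ∀ q ∈ rest, (q.1 = 0 ∨ q.1 = 1 ∨ q.1 = 7 ∨ q.1 = 8) → 0 ≤ q.2 :=
      fun q hq => hl q (List.mem_cons_of_mem _ hq)
    by_cases hE : end_ ≤ start - rem
    · rw [pvBGo]
      simp only [if_pos hE]
      rw [pvLoop2_nonpos _ _ _ (by omega : ¬ end_ - start > 0)]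
    · rw [pvBGo, pvLoop1]
      simp only [if_neg hE, if_pos hrem]
      have hst : ¬ start ≤ start - rem := by omega
      by_cases hmi : c = 0 ∨ c = 1 ∨ c = 7 ∨ c = 8
      · have hl0 : 0 ≤ l := hl (c, l) (List.mem_cons_self) hmi
        have hMI : (is_cigar_M c || c == 1) = true := by
          rcases hmi with h' | h' | h' | h' <;> simp [is_cigar_M, h']
        simp only [hMI, if_true]
        by_cases hgt : l > rem
        · -- straddling op: relabelled to MATCH of length l - rem
          have hstep : (if (c == 1) = true then
                pvBGo start end_ rest (start - rem + l)
                  (if start ≤ start - rem then ins + min l (end_ - (start - rem)) else ins)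
              else if (c == 0 || c == 7 || c == 8) = true then
                pvBGo start end_ rest (start - rem + l) ins
              else pvBGo start end_ rest (start - rem) ins) =
              pvBGo start end_ rest (start - rem + l) ins := by
            rcases hmi with h' | h' | h' | h' <;> subst h' <;> simp [hst]
          rw [if_pos hgt, hstep, pvLoop2]
          by_cases h2 : end_ - start > 0
          · simp only [if_pos h2]
            have : is_cigar_M 0 = true := rfl
            simp only [this, if_true]
            by_cases h3 : l - rem > end_ - start
            · rw [if_pos h3, pvBGo_stop _ _ _ _ _ (by omega)]
            · rw [if_neg h3]
              by_cases hz : 0 < end_ - start - (l - rem)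
              · have := pvB_loop2 start end_ rest hlr (end_ - start - (l - rem)) ins hz (by omega)
                rw [show end_ - (end_ - start - (l - rem)) = start - rem + l by ring] at this
                exact this
              · rw [pvBGo_stop _ _ _ _ _ (by omega), pvLoop2_nonpos _ _ _ hz]
          · simp only [if_neg h2]
            rw [pvBGo_stop _ _ _ _ _ (by omega)]
        · rw [if_neg hgt]
          have hstep : (if (c == 1) = true then
                pvBGo start end_ rest (start - rem + l)
                  (if start ≤ start - rem then ins + min l (end_ - (start - rem)) else ins)
              else if (c == 0 || c == 7 || c == 8) = true then
                pvBGo start end_ rest (start - rem + l) ins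
              else pvBGo start end_ rest (start - rem) ins) =
              pvBGo start end_ rest (start - rem + l) ins := by
            rcases hmi with h' | h' | h' | h' <;> subst h' <;> simp [hst]
          rw [hstep]
          by_cases hz : 0 < rem - l
          · have := ih hlr (rem - l) ins hz
            rw [show start - (rem - l) = start - rem + l by ring] at this
            exact this
          · have hrl : rem - l = 0 := by omega
            rw [pvLoop1_nonpos _ _ (by omega)]
            have hpos : start - rem + l = start := by omega
            rw [hpos]
            by_cases h2 : end_ - start > 0
            · have := pvB_loop2 start end_ rest hlr (end_ - start) ins h2 (by omega)
              rw [show end_ - (end_ - start) = start by ring] at this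
              exact this
            · rw [pvBGo_stop _ _ _ _ _ (by omega), pvLoop2_nonpos _ _ _ h2]
      · have hM : is_cigar_M c = false := by
          simp only [not_or] at hmi
          simp [is_cigar_M, hmi.1, hmi.2.2.1, hmi.2.2.2]
        have hb : (c == 0 || c == 7 || c == 8) = false := by
          simp only [not_or] at hmi
          simp [hmi.1, hmi.2.2.1, hmi.2.2.2]
        have hc1' : (c == 1) = false := by
          simp only [not_or] at hmi
          simp [hmi.2.1]
        simp only [hM, hc1', hb, Bool.false_eq_true, if_false]
        exact ih hlr rem ins hrem

-- A's second loop adds to ins only at an insertion op, so without one it returns ins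
theorem pvLoop2_noI (ys : List (Int × Int)) (h : ∀ p ∈ ys, p.1 ≠ 1) :
    ∀ rem ins : Int, pvLoop2 ys rem ins = ins := by
  induction ys with
  | nil => intro rem ins; rw [pvLoop2]; split_ifs <;> rfl
  | cons p rest ih =>
    intro rem ins
    obtain ⟨c, l⟩ := p
    have hc1 : (c == 1) = false := by simp [h (c, l) (List.mem_cons_self)]
    have hr : ∀ q ∈ rest, q.1 ≠ 1 := fun q hq => h q (List.mem_cons_of_mem _ hq)
    rw [pvLoop2]
    split_ifs <;> simp_all [ih hr]

-- A's first loop only relabels an op to MATCH, so it creates no insertion op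
theorem pvLoop1_noI (xs : List (Int × Int)) (h : ∀ p ∈ xs, p.1 ≠ 1) :
    ∀ rem : Int, ∀ p ∈ pvLoop1 xs rem, p.1 ≠ 1 := by
  induction xs with
  | nil => intro rem p hp; rw [pvLoop1] at hp; split_ifs at hp <;> simp_all
  | cons q rest ih =>
    intro rem p hp
    obtain ⟨c, l⟩ := q
    have hr : ∀ u ∈ rest, u.1 ≠ 1 := fun u hu => h u (List.mem_cons_of_mem _ hu)
    rw [pvLoop1] at hp
    split_ifs at hp with h1 h2 h3
    · rcases List.mem_cons.mp hp with h' | h'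
      · simp [h']
      · exact hr p h'
    · exact ih hr _ p hp
    · exact ih hr _ p hp
    · rcases List.mem_cons.mp hp with h' | h'
      · rw [h']; exact h (c, l) (List.mem_cons_self)
      · exact hr p h'

-- B adds to ins only at an insertion op
theorem pvBGo_noI (lo hi : Int) (ys : List (Int × Int)) (h : ∀ p ∈ ys, p.1 ≠ 1) :
    ∀ pos ins : Int, pvBGo lo hi ys pos ins = ins := by
  induction ys with
  | nil => intro pos ins; rfl
  | cons p rest ih =>
    intro pos ins
    obtain ⟨c, l⟩ := p
    have hc1 : (c == 1) = false := by simp [h (c, l) (List.mem_cons_self)]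
    have hr : ∀ q ∈ rest, q.1 ≠ 1 := fun q hq => h q (List.mem_cons_of_mem _ hq)
    rw [pvBGo]
    simp only [hc1, Bool.false_eq_true, if_false]
    split_ifs <;> simp [ih hr]

-- ===== VERDICT (by name: the statement is the Claim_ definition above) =====
theorem get_I_from_cigar_spec : Claim_equal_get_I_from_cigar := by
  intro xs start end_ _ hpre
  unfold Spec_get_I_from_cigar get_I_from_cigar get_I_from_cigar_alt
  rcases hpre.1 with hl | hnoI | hse
  · by_cases hs : 0 < start
    · rw [show max start 0 = start by omega, show start + (end_ - start) = end_ by ring]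
      have := pvB_loop1 start end_ xs hl start 0 hs
      rw [show start - start = 0 by ring] at this
      exact this.symm
    · rw [pvLoop1_nonpos _ _ (by omega), show max start 0 = 0 by omega]
      by_cases h2 : 0 < end_ - start
      · have := pvB_loop2 0 (end_ - start) xs hl (end_ - start) 0 h2 (by omega)
        rw [show end_ - start - (end_ - start) = 0 by ring] at this
        simpa using this.symm
      · rw [pvLoop2_nonpos _ _ _ (by omega), pvBGo_stop _ _ _ _ _ (by omega)]
  · rw [pvLoop2_noI _ (pvLoop1_noI xs hnoI start), pvBGo_noI _ _ _ hnoI]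
  · rw [pvLoop2_nonpos _ _ _ (by omega), pvBGo_empty _ _ _ (by omega : max start 0 + (end_ - start) ≤ max start 0)]
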